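-- pv_equiv track=rewrite | github.com/LevyGuy/graph-context-is-not-enough | graph_exact_patch_pipeline.py | infer_rhs_from_summary
-- ===== SOURCE A (Python) =====
-- def extract_summary_code_lines(summary: str) -> list[str]:
--     code_lines: list[str] = []
--     in_fence = False
--     for raw_line in summary.splitlines():
--         line = raw_line.rstrip("\n")
--         if line.strip().startswith("```"):
--             in_fence = not in_fence
--             continue
--         if in_fence and line.strip():
--             code_lines.append(line.strip())
--         elif "=" in line and line.strip():
--             code_lines.append(line.strip())
--     return code_lines
--
-- def infer_rhs_from_summary(original_line: str, graph_summary: str) -> str | None: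
--     if "=" not in original_line:
--         return None
--     lhs = original_line.split("=", 1)[0].strip()
--     original_rhs = original_line.split("=", 1)[1].strip()
--     for line in extract_summary_code_lines(graph_summary):
--         if "=" not in line:
--             continue
--         candidate_lhs, candidate_rhs = line.split("=", 1)
--         if candidate_lhs.strip() == lhs:
--             rhs = candidate_rhs.strip()
--             if rhs and rhs != original_rhs:
--                 return rhs
--     return None
-- ===== SOURCE B (Python) =====
-- def infer_rhs_from_summary(original_line: str, graph_summary: str) -> str | None:
--     # One fused pass over the summary lines: no intermediate code-lines list, no fence state
--     # (fence-marker lines are skipped, and every other line matters only if it contains '=').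
--     if "=" not in original_line:
--         return None
--     lhs_part, rhs_part = original_line.split("=", 1)
--     lhs = lhs_part.strip()
--     original_rhs = rhs_part.strip()
--     for raw in graph_summary.splitlines():
--         line = raw.strip()
--         if line.startswith("```") or "=" not in line:
--             continue
--         candidate_lhs, candidate_rhs = line.split("=", 1)
--         if candidate_lhs.strip() == lhs:
--             rhs = candidate_rhs.strip()
--             if rhs and rhs != original_rhs:
--                 return rhs
--     return None
-- ===== Notes on version B (the rewrite author's own statement) =====
-- stated objective: simpler
-- what changed: Replaced the two-pass design (build an intermediate code-lines list with a fence toggle, then scan it) by one fused pass over the summary lines with no intermediate list and no fence state, exploiting that fence markers are skipped and every other collected line is only used if it contains '='.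
import Mathlib
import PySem

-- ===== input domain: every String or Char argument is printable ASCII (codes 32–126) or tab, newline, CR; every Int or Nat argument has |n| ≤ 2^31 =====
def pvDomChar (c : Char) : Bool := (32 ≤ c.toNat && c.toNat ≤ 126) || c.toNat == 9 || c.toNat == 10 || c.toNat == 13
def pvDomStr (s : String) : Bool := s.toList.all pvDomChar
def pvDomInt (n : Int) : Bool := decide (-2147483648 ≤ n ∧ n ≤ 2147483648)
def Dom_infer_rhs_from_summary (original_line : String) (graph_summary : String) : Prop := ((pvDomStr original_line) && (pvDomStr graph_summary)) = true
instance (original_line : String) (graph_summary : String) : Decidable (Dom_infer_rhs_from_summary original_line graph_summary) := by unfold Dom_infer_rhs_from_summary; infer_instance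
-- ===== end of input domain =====

-- B fuses A's two passes (intermediate code-lines list + fence toggle, then scan) into one
-- pass over the summary lines with no intermediate list and no fence state (objective: simpler).


-- ===== PORT A =====
-- exact port of `raw_line.rstrip("\n")`: drop trailing '\n' characters (PySem has no
-- right-strip with a custom char set, so this is hand-written, step for step).
def pvRstripNL (cs : List Char) : List Char := (cs.reverse.dropWhile (· == '\n')).reverse

-- the for-loop of extract_summary_code_lines: state = (in_fence, remaining lines),
-- appends become cons on the recursive result.
def pvExtract (fence : Bool) : List (List Char) → List (List Char)
  | [] => []
  | raw :: rest =>
    let line := pvRstripNL raw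
    if PySem.Chars.startswith (PySem.Chars.strip line) ['`', '`', '`'] then
      pvExtract (!fence) rest
    else if fence && !(PySem.Chars.strip line).isEmpty then
      PySem.Chars.strip line :: pvExtract fence rest
    else if PySem.Chars.isIn ['='] line && !(PySem.Chars.strip line).isEmpty then
      PySem.Chars.strip line :: pvExtract fence rest
    else
      pvExtract fence rest

-- the for-loop of infer_rhs_from_summary over the extracted code lines
def pvScanA (lhs orhs : List Char) : List (List Char) → Option (List Char)
  | [] => none
  | line :: rest =>
    if !(PySem.Chars.isIn ['='] line) then pvScanA lhs orhs rest
    else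
      match PySem.Chars.splitOnMax line ['='] 1 with
      | [cl, cr] =>
        if PySem.Chars.strip cl = lhs then
          let rhs := PySem.Chars.strip cr
          if !rhs.isEmpty && rhs ≠ orhs then some rhs else pvScanA lhs orhs rest
        else pvScanA lhs orhs rest
      | _ => pvScanA lhs orhs rest   -- unreachable: split("=",1) with '=' present yields two pieces

def infer_rhs_from_summary (original_line : String) (graph_summary : String) : Option String :=
  if !(PySem.Str.isIn "=" original_line) then none
  else
    match PySem.Chars.splitOnMax original_line.toList ['='] 1 with
    | [p0, p1] =>
      (pvScanA (PySem.Chars.strip p0) (PySem.Chars.strip p1)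
        (pvExtract false (PySem.Chars.splitlines graph_summary.toList))).map String.ofList
    | _ => none   -- unreachable: split("=",1) with '=' present yields two pieces

-- ===== PORT B =====
-- the single fused loop of Source B over the raw summary lines
def pvScanB (lhs orhs : List Char) : List (List Char) → Option (List Char)
  | [] => none
  | raw :: rest =>
    let line := PySem.Chars.strip raw
    if PySem.Chars.startswith line ['`', '`', '`'] || !(PySem.Chars.isIn ['='] line) then
      pvScanB lhs orhs rest
    else
      match PySem.Chars.splitOnMax line ['='] 1 with
      | [cl, cr] =>
        if PySem.Chars.strip cl = lhs then
          let rhs := PySem.Chars.strip cr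
          if !rhs.isEmpty && rhs ≠ orhs then some rhs else pvScanB lhs orhs rest
        else pvScanB lhs orhs rest
      | _ => pvScanB lhs orhs rest   -- unreachable: split("=",1) with '=' present yields two pieces

def infer_rhs_from_summary_alt (original_line : String) (graph_summary : String) : Option String :=
  if !(PySem.Str.isIn "=" original_line) then none
  else
    match PySem.Chars.splitOnMax original_line.toList ['='] 1 with
    | [p0, p1] =>
      (pvScanB (PySem.Chars.strip p0) (PySem.Chars.strip p1)
        (PySem.Chars.splitlines graph_summary.toList)).map String.ofList
    | _ => none   -- unreachable: split("=",1) with '=' present yields two pieces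

-- ===== PRECONDITION & SPEC =====
def Spec_infer_rhs_from_summary (original_line : String) (graph_summary : String) (out : Option String) : Prop := out = infer_rhs_from_summary_alt original_line graph_summary
instance (original_line : String) (graph_summary : String) (out : Option String) : Decidable (Spec_infer_rhs_from_summary original_line graph_summary out) := by unfold Spec_infer_rhs_from_summary; infer_instance

-- ===== CLAIM (what is proved, stated in full; the proofs are below) =====
def Claim_equal_infer_rhs_from_summary : Prop := ∀ (original_line : String) (graph_summary : String), Dom_infer_rhs_from_summary original_line graph_summary → Spec_infer_rhs_from_summary original_line graph_summary (infer_rhs_from_summary original_line graph_summary)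

-- ===== LEMMAS AND PROOFS =====

-- stripping off one trailing whitespace char does not change strip
theorem pv_strip_append_space {c : Char} (hc : PySem.Chars.isspace c = true) (l : List Char) :
    PySem.Chars.strip (l ++ [c]) = PySem.Chars.strip l := by
  simp only [PySem.Chars.strip, PySem.Chars.lstrip, PySem.Chars.rstrip, List.dropWhile_append]
  by_cases he : (l.dropWhile PySem.Chars.isspace).isEmpty = true
  · rw [List.isEmpty_iff] at he
    simp [he, hc]
  · simp [he, hc]

-- strip ignores a dropped newline suffix (stated on the reversed list)
theorem pv_strip_rev_dropNL : ∀ r : List Char,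
    PySem.Chars.strip (r.dropWhile (· == '\n')).reverse = PySem.Chars.strip r.reverse := by
  intro r
  induction r with
  | nil => rfl
  | cons c r ih =>
    by_cases hc : (c == '\n') = true
    · have hceq : c = '\n' := by simpa using hc
      simp only [List.dropWhile_cons, hc, if_true, ih, List.reverse_cons]
      rw [pv_strip_append_space (by rw [hceq]; decide)]
    · simp [hc]

-- strip is invariant under first removing trailing newlines (rstrip("\n"))
theorem pv_strip_rstripNL (cs : List Char) :
    PySem.Chars.strip (pvRstripNL cs) = PySem.Chars.strip cs := by
  unfold pvRstripNL
  rw [pv_strip_rev_dropNL cs.reverse, List.reverse_reverse]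

-- membership is preserved by dropWhile when the predicate fails on the element
theorem pv_mem_dropWhile {p : Char → Bool} {a : Char} (ha : p a = false) (l : List Char) :
    a ∈ l.dropWhile p ↔ a ∈ l := by
  constructor
  · intro h; exact (List.dropWhile_sublist p (l := l)).mem h
  · intro h
    rw [← List.takeWhile_append_dropWhile (p := p) (l := l)] at h
    rcases List.mem_append.1 h with h1 | h2
    · exact absurd (List.mem_takeWhile_imp h1) (by simp [ha])
    · exact h2

theorem pv_isIn_singleton (c : Char) (s : List Char) :
    PySem.Chars.isIn [c] s = true ↔ c ∈ s := by
  rw [PySem.Chars.isIn_iff_infix, List.singleton_infix_iff]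

-- '=' survives strip (it is not whitespace)
theorem pv_isIn_eq_strip (cs : List Char) :
    PySem.Chars.isIn ['='] (PySem.Chars.strip cs) = PySem.Chars.isIn ['='] cs := by
  rw [Bool.eq_iff_iff, pv_isIn_singleton, pv_isIn_singleton]
  simp only [PySem.Chars.strip, PySem.Chars.lstrip, PySem.Chars.rstrip, List.mem_reverse,
    pv_mem_dropWhile (by decide : PySem.Chars.isspace '=' = false)]

-- '=' survives rstrip("\n")
theorem pv_isIn_eq_rstripNL (cs : List Char) :
    PySem.Chars.isIn ['='] (pvRstripNL cs) = PySem.Chars.isIn ['='] cs := by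
  rw [Bool.eq_iff_iff, pv_isIn_singleton, pv_isIn_singleton]
  unfold pvRstripNL
  simp only [List.mem_reverse,
    pv_mem_dropWhile (p := fun x => x == '\n') (by decide : ('=' == '\n') = false)]

-- a line containing '=' has a non-empty strip
theorem pv_strip_not_empty_of_isIn {cs : List Char}
    (h : PySem.Chars.isIn ['='] (PySem.Chars.strip cs) = true) :
    (PySem.Chars.strip cs).isEmpty = false := by
  rw [pv_isIn_singleton] at h
  simp [List.isEmpty_eq_false_iff, List.ne_nil_of_mem h]

-- the main loop fusion: scanning A's extracted code lines equals B's fused scan,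
-- for either fence state
theorem pv_scan_extract (lhs orhs : List Char) :
    ∀ (lines : List (List Char)) (fence : Bool),
      pvScanA lhs orhs (pvExtract fence lines) = pvScanB lhs orhs lines := by
  intro lines
  induction lines with
  | nil => intro fence; rfl
  | cons raw rest ih =>
    intro fence
    have hs := pv_strip_rstripNL raw
    by_cases h1 : PySem.Chars.startswith (PySem.Chars.strip raw) ['`', '`', '`'] = true
    · simp only [pvExtract, pvScanB, hs, h1, if_true, Bool.true_or, ih]
    · by_cases h2 : PySem.Chars.isIn ['='] (PySem.Chars.strip raw) = true
      · have hraw : PySem.Chars.isIn ['='] (pvRstripNL raw) = true := by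
          rw [pv_isIn_eq_rstripNL, ← pv_isIn_eq_strip]; exact h2
        have hne : (PySem.Chars.strip raw).isEmpty = false := pv_strip_not_empty_of_isIn h2
        cases fence <;>
        · simp [pvExtract, pvScanB, hs, h1, h2, hraw, hne]
          simp only [pvScanA, h2]
          simp [ih]
      · have hraw : PySem.Chars.isIn ['='] (pvRstripNL raw) = false := by
          rw [pv_isIn_eq_rstripNL, ← pv_isIn_eq_strip]
          exact Bool.not_eq_true _ ▸ h2
        by_cases h3 : (fence && !(PySem.Chars.strip raw).isEmpty) = true
        · simp [pvExtract, pvScanB, hs, h1, h2, h3]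
          simp only [pvScanA, h2]
          simp [ih]
        · simp [pvExtract, pvScanB, hs, h1, h2, hraw, h3]
          simp [ih]

-- ===== VERDICT (by name: the statement is the Claim_ definition above) =====
theorem infer_rhs_from_summary_spec : Claim_equal_infer_rhs_from_summary := by
  intro ol gs _
  unfold Spec_infer_rhs_from_summary infer_rhs_from_summary infer_rhs_from_summary_alt
  by_cases h : PySem.Str.isIn "=" ol = true
  · simp only [h]
    cases PySem.Chars.splitOnMax ol.toList ['='] 1 with
    | nil => rfl
    | cons p0 t =>
      cases t with
      | nil => rfl
      | cons p1 t2 =>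
        cases t2 with
        | nil => simp [pv_scan_extract]
        | cons _ _ => rfl
  · rw [Bool.not_eq_true] at h
    have h' : PySem.Chars.isIn ['='] ol.toList = false := by simpa using h
    simp [h']
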